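-- pv_equiv track=rewrite | github.com/nickhung1222/VICI2 | tools/report.py | _summarize_narratives
-- ===== SOURCE A (Python) =====
-- from typing import Any, Optional
--
-- def _summarize_narratives(rows: list[dict[str, Any]]) -> str:
--     if not rows:
--         return ""
--     source_names: list[str] = []
--     article_types: list[str] = []
--     for row in rows:
--         source_name = str(row.get("source_name", "")).strip()
--         article_type = str(row.get("article_type", "")).strip()
--         if source_name and source_name not in source_names:
--             source_names.append(source_name)
--         if article_type and article_type not in article_types:
--             article_types.append(article_type)
--
--     summary_parts = [f"共整理 {len(rows)} 筆敘事"]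
--     if article_types:
--         summary_parts.append(f"主要類型包含 {', '.join(article_types[:3])}")
--     if source_names:
--         summary_parts.append(f"來源涵蓋 {', '.join(source_names[:3])}")
--     return "；".join(summary_parts)
-- ===== SOURCE B (Python) =====
-- from typing import Any
--
-- def _summarize_narratives(rows: list[dict[str, Any]]) -> str:
--     if not rows:
--         return ""
--
--     def first_k_unique(field: str, k: int = 3) -> list[str]:
--         out: list[str] = []
--         for row in rows:
--             v = str(row.get(field, "")).strip()
--             if v and v not in out:
--                 out.append(v)
--                 if len(out) == k:
--                     break
--         return out
--
--     source_names = first_k_unique("source_name")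
--     article_types = first_k_unique("article_type")
--
--     parts = [f"共整理 {len(rows)} 筆敘事"]
--     if article_types:
--         parts.append(f"主要類型包含 {', '.join(article_types)}")
--     if source_names:
--         parts.append(f"來源涵蓋 {', '.join(source_names)}")
--     return "；".join(parts)
-- ===== Notes on version B (the rewrite author's own statement) =====
-- stated objective: alternative
-- what changed: Instead of one pass that builds full deduplicated lists of all unique names and slices them to 3 afterwards, B runs one bounded early-terminating scan per field that stops as soon as 3 unique values are found, so it never materialises more than 3 names and its membership check is against a list of length at most 3.
import Mathlib
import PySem

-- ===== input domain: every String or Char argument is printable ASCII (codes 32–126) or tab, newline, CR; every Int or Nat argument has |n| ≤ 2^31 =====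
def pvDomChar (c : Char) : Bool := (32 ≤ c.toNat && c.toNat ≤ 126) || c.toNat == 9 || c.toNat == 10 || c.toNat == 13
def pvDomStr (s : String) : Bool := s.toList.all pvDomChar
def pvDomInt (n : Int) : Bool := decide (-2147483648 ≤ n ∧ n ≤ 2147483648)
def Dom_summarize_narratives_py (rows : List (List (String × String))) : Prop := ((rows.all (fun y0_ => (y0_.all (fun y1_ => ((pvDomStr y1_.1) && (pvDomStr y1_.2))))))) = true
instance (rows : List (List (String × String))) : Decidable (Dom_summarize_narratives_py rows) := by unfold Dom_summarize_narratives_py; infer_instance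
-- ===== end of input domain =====

-- B replaces A's full deduplication pass (all unique names, sliced to 3 at the end) with one
-- bounded early-terminating scan per field that stops as soon as 3 unique values are found.

-- ===== PORT A =====
-- str(row.get(k, "")).strip() (row values are strings on Dom, so str() is the identity)
def pvVal (row : List (String × String)) (k : String) : String :=
  PySem.Str.strip ((PySem.Dict.ofList row).getD k "")

def summarize_narratives_py (rows : List (List (String × String))) : String :=
  if rows = [] then "" else
    let p := rows.foldl (fun (st : List String × List String) row =>
        (if pvVal row "source_name" ≠ "" ∧ pvVal row "source_name" ∉ st.1
           then st.1 ++ [pvVal row "source_name"] else st.1,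
         if pvVal row "article_type" ≠ "" ∧ pvVal row "article_type" ∉ st.2
           then st.2 ++ [pvVal row "article_type"] else st.2)) ([], [])
    let source_names := p.1
    let article_types := p.2
    let summary_parts := [PySem.Str.join "" ["共整理 ", PySem.Int.toStr (rows.length : Int), " 筆敘事"]]
    let summary_parts := if article_types ≠ []
      then summary_parts ++ [PySem.Str.join "" ["主要類型包含 ", PySem.Str.join ", " (PySem.List.slice article_types none (some 3))]]
      else summary_parts
    let summary_parts := if source_names ≠ []
      then summary_parts ++ [PySem.Str.join "" ["來源涵蓋 ", PySem.Str.join ", " (PySem.List.slice source_names none (some 3))]]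
      else summary_parts
    PySem.Str.join "；" summary_parts

-- ===== PORT B =====
-- first_k_unique: scan rows, collect stripped non-empty unique values, break at k
def firstKUnique (field : String) (k : Nat) (rows : List (List (String × String))) (acc : List String) : List String :=
  match rows with
  | [] => acc
  | row :: t =>
    let v := pvVal row field
    if v ≠ "" ∧ v ∉ acc then
      if (acc ++ [v]).length = k then acc ++ [v] else firstKUnique field k t (acc ++ [v])
    else firstKUnique field k t acc

def summarize_narratives_py_alt (rows : List (List (String × String))) : String :=
  if rows = [] then "" else
    let source_names := firstKUnique "source_name" 3 rows []
    let article_types := firstKUnique "article_type" 3 rows []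
    let parts := [PySem.Str.join "" ["共整理 ", PySem.Int.toStr (rows.length : Int), " 筆敘事"]]
    let parts := if article_types ≠ []
      then parts ++ [PySem.Str.join "" ["主要類型包含 ", PySem.Str.join ", " article_types]]
      else parts
    let parts := if source_names ≠ []
      then parts ++ [PySem.Str.join "" ["來源涵蓋 ", PySem.Str.join ", " source_names]]
      else parts
    PySem.Str.join "；" parts

-- ===== PRECONDITION & SPEC =====
def Spec_summarize_narratives_py (rows : List (List (String × String))) (out : String) : Prop := out = summarize_narratives_py_alt rows
instance (rows : List (List (String × String))) (out : String) : Decidable (Spec_summarize_narratives_py rows out) := by unfold Spec_summarize_narratives_py; infer_instance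

-- ===== CLAIM =====
def Claim_equal_summarize_narratives_py : Prop := ∀ (rows : List (List (String × String))), Dom_summarize_narratives_py rows → Spec_summarize_narratives_py rows (summarize_narratives_py rows)

-- ===== LEMMAS AND PROOFS =====

-- A's membership-append fold only ever appends: the initial accumulator is a prefix of the result.
theorem pv_fold_prefix (field : String) (rows : List (List (String × String))) (acc : List String) :
    acc <+: rows.foldl (fun (a : List String) r =>
      if pvVal r field ≠ "" ∧ pvVal r field ∉ a then a ++ [pvVal r field] else a) acc := by
  induction rows generalizing acc with
  | nil => simp
  | cons r t ih =>
    simp only [List.foldl_cons]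
    refine List.IsPrefix.trans ?_ (ih _)
    split_ifs with h
    · exact ⟨[pvVal r field], rfl⟩
    · exact List.prefix_refl _

-- B's bounded scan equals the first k elements of A's full dedup fold.
theorem pv_firstK_eq (field : String) (k : Nat) (rows : List (List (String × String)))
    (acc : List String) (hlt : acc.length < k) :
    firstKUnique field k rows acc
      = (rows.foldl (fun (a : List String) r =>
          if pvVal r field ≠ "" ∧ pvVal r field ∉ a then a ++ [pvVal r field] else a) acc).take k := by
  induction rows generalizing acc with
  | nil =>
    simp only [firstKUnique, List.foldl_nil]
    exact (List.take_of_length_le (by omega)).symm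
  | cons r t ih =>
    simp only [firstKUnique, List.foldl_cons]
    by_cases h : pvVal r field ≠ "" ∧ pvVal r field ∉ acc
    · rw [if_pos h, if_pos h]
      by_cases hk : (acc ++ [pvVal r field]).length = k
      · rw [if_pos hk]
        obtain ⟨s, hs⟩ := pv_fold_prefix field t (acc ++ [pvVal r field])
        rw [← hs, ← hk, List.take_left]
      · rw [if_neg hk]
        exact ih _ (by simp at hk ⊢; omega)
    · rw [if_neg h, if_neg h]
      exact ih _ hlt

-- ===== VERDICT =====
theorem summarize_narratives_py_spec : Claim_equal_summarize_narratives_py := by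
  intro rows _
  unfold Spec_summarize_narratives_py summarize_narratives_py summarize_narratives_py_alt
  by_cases h : rows = []
  · simp [h]
  · simp only [h, if_false]
    rw [PySem.List.foldl_prod_mk
        (f := fun (a : List String) row => if pvVal row "source_name" ≠ "" ∧ pvVal row "source_name" ∉ a then a ++ [pvVal row "source_name"] else a)
        (g := fun (a : List String) row => if pvVal row "article_type" ≠ "" ∧ pvVal row "article_type" ∉ a then a ++ [pvVal row "article_type"] else a)]
    rw [pv_firstK_eq "source_name" 3 rows [] (by simp),
        pv_firstK_eq "article_type" 3 rows [] (by simp)]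
    simp [PySem.List.slice_to, List.take_eq_nil_iff]
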